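-- pv_equiv track=rewrite | github.com/mjs227/FoLDS | Get_Concept_Vectors.py | atomic_decomposition
-- ===== SOURCE A (Python) =====
-- def atomic_decomposition(item, main_e):
--     pred, args = item[0], item[1:]
--     out, ind_list_master = [], set(range(len(args)))
--
--     for i in range(len(args)):
--         if args[i] == main_e:
--             ind_list = ind_list_master - {i}
--             ps_list = powerset(ind_list)
--
--             for j in ps_list:
--                 out_str, no_ex_pass = '(', True
--
--                 for k in range(len(args)):
--                     if k == i:
--                         out_str += '#,'
--                     elif k in j:
--                         out_str += '_,'
--                     elif args[k] == 'EX_PASS':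
--                         no_ex_pass = False
--                         break
--                     else:
--                         out_str += args[k] + ','
--
--                 if no_ex_pass:
--                     out.append((pred + out_str[:len(out_str) - 1] + ')', args[i]))
--
--                     if not j == ind_list:
--                         out.append(('_' + out_str[:len(out_str) - 1] + ')', args[i]))
--
--     return out
--
-- def powerset(a):
--     s = list(a)
--     x_, out = len(s), []
--
--     for i in range(1 << x_):
--         out.append({s[j] for j in range(x_) if (i & (1 << j))})
--
--     return out
-- ===== SOURCE B (Python) =====
-- def _subsets(s):
--     # all subsets of s (as lists), in binary-counter order with s[0] the fastest bit
--     if not s: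
--         return [[]]
--     rest = _subsets(s[1:])
--     out = []
--     for t in rest:
--         out.append(t)
--         out.append([s[0]] + t)
--     return out
--
--
-- def atomic_decomposition(item, main_e):
--     pred, args = item[0], item[1:]
--     n = len(args)
--     out = []
--     for i in range(n):
--         if args[i] != main_e:
--             continue
--         free = [k for k in range(n) if k != i and args[k] != 'EX_PASS']
--         for sel in _subsets(free):
--             parts = ['#' if k == i else
--                      '_' if (k in sel or args[k] == 'EX_PASS') else args[k]
--                      for k in range(n)]
--             body = '(' + ','.join(parts) + ')'
--             out.append((pred + body, args[i]))
--             if len(sel) != len(free):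
--                 out.append(('_' + body, args[i]))
--     return out
-- ===== Notes on version B (the rewrite author's own statement) =====
-- stated objective: faster
-- what changed: Instead of enumerating the full powerset of all other argument positions and discarding (via an inner break) every subset that leaves some EX_PASS position uncovered, B enumerates only subsets of the EX_PASS-free positions (generated recursively rather than by a bit counter) and builds each string by classifying positions and joining, so blocked subsets are never generated.
import Mathlib
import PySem

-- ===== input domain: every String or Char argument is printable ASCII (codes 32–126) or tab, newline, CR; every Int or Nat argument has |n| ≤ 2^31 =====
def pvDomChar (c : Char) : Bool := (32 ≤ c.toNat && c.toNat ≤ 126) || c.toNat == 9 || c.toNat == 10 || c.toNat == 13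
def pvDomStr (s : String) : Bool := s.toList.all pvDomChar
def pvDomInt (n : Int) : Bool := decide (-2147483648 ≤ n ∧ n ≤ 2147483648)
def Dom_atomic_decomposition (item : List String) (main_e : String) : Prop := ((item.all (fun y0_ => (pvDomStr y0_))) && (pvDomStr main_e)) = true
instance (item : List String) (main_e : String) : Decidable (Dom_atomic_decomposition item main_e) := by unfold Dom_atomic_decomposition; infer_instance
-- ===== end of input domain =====

-- B replaces A's full-powerset enumeration + inner break with enumeration of subsets of
-- the EX_PASS-free positions only (asymptotically fewer subsets when EX_PASS occurs).

-- ===== PORT A =====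
-- powerset(a): A passes a set of small nonnegative ints; CPython iterates such a set in
-- ascending order, so list(a) is the ascending list and we take a sorted List Nat argument.
-- The set {s[j] for j in range(x_) if i & (1 << j)} is kept as the list of chosen elements
-- (only membership and set-equality with ind_list are used later, both faithful on these lists).
def pvPowerset (s : List Nat) : List (List Nat) :=
  (List.range (2 ^ s.length)).map (fun i =>
    ((List.range s.length).filter (fun j => i.testBit j)).map (fun j => s[j]?.getD 0))

-- the inner 'for k in range(len(args))' loop of A, with its break (none = broke out)
def pvInnerA (args : List String) (i : Nat) (j : List Nat) : List Nat → List Char → Option (List Char)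
  | [], acc => some acc
  | k :: ks, acc =>
    if k = i then pvInnerA args i j ks (acc ++ ['#', ','])
    else if j.contains k then pvInnerA args i j ks (acc ++ ['_', ','])
    else if args[k]?.getD "" = "EX_PASS" then none
    else pvInnerA args i j ks (acc ++ (args[k]?.getD "").toList ++ [','])

def atomic_decomposition (item : List String) (main_e : String) : List (String × String) :=
  match item with
  | [] => []  -- Python raises IndexError here; excluded by Pre_
  | pred :: args =>
    let n := args.length
    (List.range n).foldl (fun out i =>
      if args[i]?.getD "" = main_e then
        let ind_list : List Nat := (List.range n).filter (fun k => k ≠ i)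
        let ps_list := pvPowerset ind_list
        ps_list.foldl (fun out j =>
          match pvInnerA args i j (List.range n) ['('] with
          | none => out
          | some out_str =>
            -- out_str[:len(out_str)-1] (out_str nonempty, nonnegative bound = take)
            let body := out_str.take (out_str.length - 1)
            let out := out ++ [(String.ofList (pred.toList ++ body ++ [')']), args[i]?.getD "")]
            if j ≠ ind_list then out ++ [(String.ofList ('_' :: (body ++ [')'])), args[i]?.getD "")]
            else out) out
      else out) []

-- ===== PORT B =====
-- _subsets(s): all subsets in binary-counter order, s[0] the fastest bit
def pvSubsets (s : List Nat) : List (List Nat) :=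
  match s with
  | [] => [[]]
  | x :: xs => (pvSubsets xs).flatMap (fun t => [t, x :: t])

def atomic_decomposition_alt (item : List String) (main_e : String) : List (String × String) :=
  match item with
  | [] => []  -- Python raises IndexError here; excluded by Pre_
  | pred :: args =>
    let n := args.length
    (List.range n).foldl (fun out i =>
      if args[i]?.getD "" ≠ main_e then out
      else
        let free : List Nat := (List.range n).filter (fun k => k ≠ i ∧ args[k]?.getD "" ≠ "EX_PASS")
        (pvSubsets free).foldl (fun out sel =>
          let parts : List (List Char) := (List.range n).map (fun k =>
            if k = i then ['#']
            else if sel.contains k ∨ args[k]?.getD "" = "EX_PASS" then ['_']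
            else (args[k]?.getD "").toList)
          let body := ['('] ++ (parts.intersperse [',']).flatten ++ [')']
          let out := out ++ [(String.ofList (pred.toList ++ body), args[i]?.getD "")]
          if sel.length ≠ free.length then out ++ [(String.ofList ('_' :: body), args[i]?.getD "")]
          else out) out) []

-- ===== PRECONDITION & SPEC =====
-- A evaluates item[0], which raises IndexError on the empty list: Pre_ excludes only item = [].
def Pre_atomic_decomposition (item : List String) (main_e : String) : Prop := item ≠ []
instance (item : List String) (main_e : String) : Decidable (Pre_atomic_decomposition item main_e) := by unfold Pre_atomic_decomposition; infer_instance
def pvWitness_atomic_decomposition : List String × String := (["likes", "a", "EX_PASS", "a"], "a")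

def Spec_atomic_decomposition (item : List String) (main_e : String) (out : List (String × String)) : Prop := out = atomic_decomposition_alt item main_e
instance (item : List String) (main_e : String) (out : List (String × String)) : Decidable (Spec_atomic_decomposition item main_e out) := by unfold Spec_atomic_decomposition; infer_instance

-- ===== CLAIM (what is proved, stated in full; the proofs are below) =====
def Claim_equal_atomic_decomposition : Prop := ∀ (item : List String) (main_e : String), Dom_atomic_decomposition item main_e → Pre_atomic_decomposition item main_e → Spec_atomic_decomposition item main_e (atomic_decomposition item main_e)

-- ===== LEMMAS AND PROOFS =====

-- A's output chunk for one position k, relative to subset j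
def pvPartA (args : List String) (i : Nat) (j : List Nat) (k : Nat) : List Char :=
  if k = i then ['#', ','] else if j.contains k then ['_', ','] else (args[k]?.getD "").toList ++ [',']

-- what one surviving subset j contributes to A's output at position i
def pvEmitA (pred : String) (args : List String) (i : Nat) (j : List Nat) : List (String × String) :=
  let body := '(' :: ((List.range args.length).flatMap (pvPartA args i j)).dropLast
  [(String.ofList (pred.toList ++ body ++ [')']), args[i]?.getD "")] ++
    (if j = (List.range args.length).filter (fun k => k ≠ i) then []
     else [(String.ofList ('_' :: (body ++ [')'])), args[i]?.getD "")])

def pvExtract (s : List Nat) (c : Nat) : List Nat :=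
  ((List.range s.length).filter (fun j => c.testBit j)).map (fun j => s[j]?.getD 0)

lemma pvPowerset_def (s : List Nat) :
    pvPowerset s = (List.range (2 ^ s.length)).map (pvExtract s) := rfl

lemma pvRange_two_mul (m : Nat) :
    List.range (2 * m) = (List.range m).flatMap (fun q => [2*q, 2*q+1]) := by
  induction m with
  | zero => simp
  | succ m ih => simp [List.range_succ, ih, Nat.mul_succ]

lemma pvExtract_cons (x : Nat) (s : List Nat) (c : Nat) :
    pvExtract (x :: s) c = (if c.testBit 0 then [x] else []) ++
      ((List.range s.length).filter (fun j => c.testBit (j+1))).map (fun j => s[j]?.getD 0) := by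
  simp only [pvExtract, List.length_cons, List.range_succ_eq_map, List.filter_cons,
    List.filter_map, List.map_map]
  by_cases h0 : c.testBit 0 <;>
    simp [h0, Function.comp_def, Nat.succ_eq_add_one, List.getElem?_cons_succ,
      List.getElem?_cons_zero]

lemma pvExtract_even (x : Nat) (s : List Nat) (q : Nat) :
    pvExtract (x :: s) (2*q) = pvExtract s q := by
  rw [pvExtract_cons]
  have h0 : (2*q).testBit 0 = false := by simp [Nat.testBit_zero]
  have h1 : ∀ j, (2*q).testBit (j+1) = q.testBit j := by
    intro j; rw [Nat.testBit_succ]; norm_num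
  simp only [h0, h1, Bool.false_eq_true, if_false, List.nil_append, pvExtract]

lemma pvExtract_odd (x : Nat) (s : List Nat) (q : Nat) :
    pvExtract (x :: s) (2*q+1) = x :: pvExtract s q := by
  rw [pvExtract_cons]
  have h0 : (2*q+1).testBit 0 = true := by simp [Nat.testBit_zero]
  have h1 : ∀ j, (2*q+1).testBit (j+1) = q.testBit j := by
    intro j; rw [Nat.testBit_succ]; congr 1; omega
  simp only [h0, h1, if_true, List.singleton_append, pvExtract]

lemma pvPowerset_eq_pvSubsets (s : List Nat) : pvPowerset s = pvSubsets s := by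
  induction s with
  | nil => rfl
  | cons x xs ih =>
    rw [show pvSubsets (x :: xs) = (pvSubsets xs).flatMap (fun t => [t, x :: t]) from rfl,
        ← ih, pvPowerset_def, pvPowerset_def]
    rw [List.length_cons, pow_succ, Nat.mul_comm, pvRange_two_mul, List.map_flatMap,
        List.flatMap_map]
    apply List.flatMap_congr
    intro q _
    simp [pvExtract_even, pvExtract_odd]

lemma pvSubsets_sublist {s t : List Nat} (ht : t ∈ pvSubsets s) : t.Sublist s := by
  induction s generalizing t with
  | nil =>
    simp only [pvSubsets, List.mem_singleton] at ht
    simp [ht]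
  | cons x xs ih =>
    simp only [pvSubsets, List.mem_flatMap, List.mem_cons, List.not_mem_nil, or_false] at ht
    obtain ⟨u, hu, h | h⟩ := ht
    · subst h; exact (ih hu).cons x
    · subst h; exact (ih hu).cons₂ x

lemma pvFlatMap_ite {α β : Type} (l : List α) (q : α → Bool) (g : α → List β) :
    l.flatMap (fun t => if q t then g t else []) = (l.filter q).flatMap g := by
  induction l with
  | nil => simp
  | cons a l ih => by_cases h : q a <;> simp [List.filter_cons, h, ih]

lemma pvFlatMap_single {α β : Type} (l : List α) (f : α → β) :
    l.flatMap (fun t => [f t]) = l.map f := by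
  induction l with
  | nil => simp
  | cons a l ih => simp [ih]

lemma pvPartA_ne_nil (args : List String) (i : Nat) (j : List Nat) (k : Nat) :
    pvPartA args i j k ≠ [] := by
  unfold pvPartA; split_ifs <;> simp

lemma pvFlat_ne (args : List String) (i : Nat) (j : List Nat) (h : args.length ≠ 0) :
    (List.range args.length).flatMap (pvPartA args i j) ≠ [] := by
  obtain ⟨m, hm⟩ : ∃ m, args.length = m + 1 := ⟨args.length - 1, by omega⟩
  rw [hm, List.range_succ, List.flatMap_append]
  intro hc
  have hlc := congrArg List.length hc
  simp only [List.length_append, List.length_nil, List.flatMap_cons, List.flatMap_nil,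
    List.append_nil, Nat.add_eq_zero] at hlc
  exact pvPartA_ne_nil args i j m (List.length_eq_zero_iff.mp hlc.2)

-- A's inner k-loop characterised: none iff some position is blocked, else one chunk per position
lemma pvInnerA_eq (args : List String) (i : Nat) (j : List Nat) :
    ∀ (ks : List Nat) (acc : List Char), pvInnerA args i j ks acc =
      if ks.all (fun k => k == i || j.contains k || !(args[k]?.getD "" == "EX_PASS"))
      then some (acc ++ ks.flatMap (pvPartA args i j)) else none := by
  intro ks
  induction ks with
  | nil => intro acc; simp [pvInnerA]
  | cons k ks ih =>
    intro acc
    simp only [pvInnerA, List.all_cons, List.flatMap_cons]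
    by_cases h1 : k = i
    · rw [if_pos h1, ih]
      have hfk : (k == i || j.contains k || !(args[k]?.getD "" == "EX_PASS")) = true := by
        simp [h1]
      rw [hfk, Bool.true_and]
      have hpk : pvPartA args i j k = ['#', ','] := by simp [pvPartA, h1]
      rw [hpk]
      simp [List.append_assoc]
    · rw [if_neg h1]
      by_cases h2 : j.contains k
      · rw [if_pos h2, ih]
        have h2' : k ∈ j := by simpa using h2
        have hfk : (k == i || j.contains k || !(args[k]?.getD "" == "EX_PASS")) = true := by
          simp [h2']
        rw [hfk, Bool.true_and]
        have hpk : pvPartA args i j k = ['_', ','] := by simp [pvPartA, h1, h2']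
        rw [hpk]
        simp [List.append_assoc]
      · rw [if_neg h2]
        by_cases h3 : args[k]?.getD "" = "EX_PASS"
        · rw [if_pos h3]
          have hfk : (k == i || j.contains k || !(args[k]?.getD "" == "EX_PASS")) = false := by
            have h2' : k ∉ j := by simpa using h2
            simp [h1, h2', h3]
          rw [hfk, Bool.false_and]
          simp
        · rw [if_neg h3, ih]
          have hfk : (k == i || j.contains k || !(args[k]?.getD "" == "EX_PASS")) = true := by
            simp [h3]
          rw [hfk, Bool.true_and]
          have hpk : pvPartA args i j k = (args[k]?.getD "").toList ++ [','] := by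
            have h2' : k ∉ j := by simpa using h2
            simp [pvPartA, h1, h2', h3]
          rw [hpk]
          simp [List.append_assoc]

-- the survival test over all positions equals "j covers every EX_PASS index other than i"
lemma pvCond (args : List String) (i : Nat) (j : List Nat) :
    ((List.range args.length).all (fun k => k == i || j.contains k || !(args[k]?.getD "" == "EX_PASS")))
      = ((((List.range args.length).filter (fun k => k ≠ i)).filter
            (fun k => args[k]?.getD "" == "EX_PASS")).all (fun e => j.contains e)) := by
  rw [Bool.eq_iff_iff]
  simp [List.all_eq_true, List.mem_range]
  constructor
  · intro h e he
    have h0 := h e he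
    tauto
  · intro h k hk
    have h0 := h k hk
    tauto

-- core combinatorial fact: the subsets of u containing every isEx element of u are, in
-- counter order, exactly the subsets of the non-isEx elements with the isEx ones merged back
lemma pvFilter_subsets (isEx : Nat → Bool) :
    ∀ (u : List Nat), u.Nodup →
      (pvSubsets u).filter (fun j => (u.filter isEx).all (fun e => j.contains e))
      = (pvSubsets (u.filter (fun k => !isEx k))).map
          (fun sel => u.filter (fun k => isEx k || sel.contains k)) := by
  intro u
  induction u with
  | nil => intro _; simp [pvSubsets]
  | cons x u' ih =>
    intro hnd
    have hx' : x ∉ u' := (List.nodup_cons.mp hnd).1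
    have hnd' : u'.Nodup := (List.nodup_cons.mp hnd).2
    have hcont : ∀ (t : List Nat) (e : Nat), e ≠ x → ((x :: t).contains e = t.contains e) := by
      intro t e he; simp [he]
    have hall : ∀ t ∈ pvSubsets u',
        ((u'.filter isEx).all (fun e => (x :: t).contains e))
          = ((u'.filter isEx).all (fun e => t.contains e)) := by
      intro t _
      rw [Bool.eq_iff_iff]
      simp only [List.all_eq_true]
      constructor
      · intro h e he
        have hex : e ≠ x := fun hh => hx' (List.mem_of_mem_filter (hh ▸ he))
        have h0 := h e he; rwa [hcont t e hex] at h0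
      · intro h e he
        have hex : e ≠ x := fun hh => hx' (List.mem_of_mem_filter (hh ▸ he))
        rw [hcont t e hex]; exact h e he
    by_cases hx : isEx x
    · have h1 : (x :: u').filter isEx = x :: u'.filter isEx := by simp [hx]
      have h2 : (x :: u').filter (fun k => !isEx k) = u'.filter (fun k => !isEx k) := by
        simp [List.filter_cons, hx]
      rw [show pvSubsets (x :: u') = (pvSubsets u').flatMap (fun t => [t, x :: t]) from rfl,
          h1, h2, List.filter_flatMap]
      have h3 : ∀ t ∈ pvSubsets u',
          ([t, x :: t].filter (fun j => (x :: u'.filter isEx).all (fun e => j.contains e)))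
            = if (u'.filter isEx).all (fun e => t.contains e) then [x :: t] else [] := by
        intro t ht
        have hxt : x ∉ t := fun hmem => hx' ((pvSubsets_sublist ht).subset hmem)
        have hpt : ((x :: u'.filter isEx).all (fun e => t.contains e)) = false := by
          rw [List.all_cons]
          simp [hxt]
        have hpxt : ((x :: u'.filter isEx).all (fun e => (x :: t).contains e))
            = ((u'.filter isEx).all (fun e => t.contains e)) := by
          rw [List.all_cons, hall t ht]
          simp
        simp only [List.filter_cons, List.filter_nil, hpt, hpxt]
        by_cases hq : ((u'.filter isEx).all (fun e => t.contains e)) = true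
        · simp [hq]
        · simp [hq]
      rw [List.flatMap_congr h3, pvFlatMap_ite, ih hnd', pvFlatMap_single, List.map_map]
      apply List.map_congr_left
      intro sel _
      simp [Function.comp, List.filter_cons, hx]
    · have h1 : (x :: u').filter isEx = u'.filter isEx := by simp [List.filter_cons, hx]
      have h2 : (x :: u').filter (fun k => !isEx k) = x :: u'.filter (fun k => !isEx k) := by
        simp [List.filter_cons, hx]
      rw [show pvSubsets (x :: u') = (pvSubsets u').flatMap (fun t => [t, x :: t]) from rfl,
          h1, h2, List.filter_flatMap]
      have h3 : ∀ t ∈ pvSubsets u',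
          ([t, x :: t].filter (fun j => (u'.filter isEx).all (fun e => j.contains e)))
            = if (u'.filter isEx).all (fun e => t.contains e) then [t, x :: t] else [] := by
        intro t ht
        simp only [List.filter_cons, List.filter_nil, hall t ht]
        by_cases hq : ((u'.filter isEx).all (fun e => t.contains e)) = true
        · simp only [if_pos hq]
        · simp only [if_neg hq]
      rw [List.flatMap_congr h3, pvFlatMap_ite, ih hnd',
          show pvSubsets (x :: u'.filter (fun k => !isEx k))
            = (pvSubsets (u'.filter (fun k => !isEx k))).flatMap (fun t => [t, x :: t]) from rfl,
          List.flatMap_map, List.map_flatMap]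
      apply List.flatMap_congr
      intro sel hsel
      have hsub := pvSubsets_sublist hsel
      have hxsel : x ∉ sel := fun hmem => hx' (List.mem_of_mem_filter (hsub.subset hmem))
      have e1 : (x :: u').filter (fun k => isEx k || sel.contains k)
          = u'.filter (fun k => isEx k || sel.contains k) := by
        simp [List.filter_cons, hx, hxsel]
      have e2 : (x :: u').filter (fun k => isEx k || (x :: sel).contains k)
          = x :: u'.filter (fun k => isEx k || sel.contains k) := by
        rw [List.filter_cons]
        have hh : (isEx x || (x :: sel).contains x) = true := by simp
        rw [hh, if_pos rfl]
        congr 1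
        apply List.filter_congr
        intro a ha
        have hax : a ≠ x := fun h => hx' (h ▸ ha)
        show (isEx a || (x :: sel).contains a) = (isEx a || sel.contains a)
        rw [hcont sel a hax]
      simp only [List.map_cons, List.map_nil]
      rw [e1, e2]

lemma pvTail (isEx : Nat → Bool) (u sel : List Nat) (hnd : u.Nodup)
    (hsub : sel.Sublist (u.filter (fun k => !isEx k))) :
    (u.filter (fun k => isEx k || sel.contains k) = u)
      ↔ sel.length = (u.filter (fun k => !isEx k)).length := by
  have hfnd : (u.filter (fun k => !isEx k)).Nodup := hnd.filter _
  constructor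
  · intro h
    have hall := List.filter_eq_self.mp h
    have hsubset : (u.filter (fun k => !isEx k)) ⊆ sel := by
      intro e he
      have hm := List.mem_filter.mp he
      have h0 := hall e hm.1
      simp only [Bool.or_eq_true] at h0
      rcases h0 with h1 | h1
      · rw [h1] at hm; simp at hm
      · simpa using h1
    have h1 : (u.filter (fun k => !isEx k)).length ≤ sel.length := (hfnd.subperm hsubset).length_le
    exact Nat.le_antisymm hsub.length_le h1
  · intro h
    have hself : sel = u.filter (fun k => !isEx k) := hsub.eq_of_length h
    apply List.filter_eq_self.mpr
    intro a ha
    by_cases hex : isEx a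
    · simp [hex]
    · have haf : a ∈ sel := by
        rw [hself]; exact List.mem_filter.mpr ⟨ha, by simp [hex]⟩
      simp [haf]

lemma pvJoin_eq : ∀ (ps : List (List Char)), ps ≠ [] →
    (ps.flatMap (fun p => p ++ [','])).dropLast = (ps.intersperse [',']).flatten
  | [], h => absurd rfl h
  | [p], _ => by simp
  | p :: q :: ps, _ => by
    have ih := pvJoin_eq (q :: ps) (by simp)
    have hne : ((q :: ps).flatMap (fun p => p ++ [','])) ≠ [] := by
      simp [List.flatMap_cons]
    rw [show ((p :: q :: ps).flatMap (fun p => p ++ [','])) =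
          (p ++ [',']) ++ (q :: ps).flatMap (fun p => p ++ [',']) from rfl,
        List.dropLast_append_of_ne_nil hne, ih,
        show List.intersperse [','] (p :: q :: ps)
          = p :: [','] :: List.intersperse [','] (q :: ps) from rfl]
    simp

-- per-position chunk equality once j is the merged subset
lemma pvPart_eq (args : List String) (i : Nat) (sel : List Nat) (k : Nat) (hk : k < args.length) :
    pvPartA args i (((List.range args.length).filter (fun k => k ≠ i)).filter
        (fun k => (args[k]?.getD "" == "EX_PASS") || sel.contains k)) k
      = (if k = i then ['#']
         else if sel.contains k ∨ args[k]?.getD "" = "EX_PASS" then ['_']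
         else (args[k]?.getD "").toList) ++ [','] := by
  by_cases hki : k = i
  · simp [pvPartA, hki]
  · have hgd : args[k]?.getD "" = args[k] := by
      simp [List.getElem?_eq_getElem hk]
    by_cases hex : args[k] = "EX_PASS"
    · simp [pvPartA, hki, hk, hgd, hex]
    · by_cases hks : k ∈ sel
      · simp [pvPartA, hki, hk, hgd, hex, hks]
      · simp [pvPartA, hki, hk, hgd, hex, hks]

-- A and B after peeling off pred (plain rfl unfoldings of the ports)
lemma pvA_cons (pred : String) (args : List String) (main_e : String) :
    atomic_decomposition (pred :: args) main_e =
      (List.range args.length).foldl (fun out i =>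
        if args[i]?.getD "" = main_e then
          (pvPowerset ((List.range args.length).filter (fun k => k ≠ i))).foldl (fun out j =>
            match pvInnerA args i j (List.range args.length) ['('] with
            | none => out
            | some out_str =>
              let body := out_str.take (out_str.length - 1)
              let out := out ++ [(String.ofList (pred.toList ++ body ++ [')']), args[i]?.getD "")]
              if j ≠ (List.range args.length).filter (fun k => k ≠ i) then
                out ++ [(String.ofList ('_' :: (body ++ [')'])), args[i]?.getD "")]
              else out) out
        else out) [] := rfl

lemma pvB_cons (pred : String) (args : List String) (main_e : String) :
    atomic_decomposition_alt (pred :: args) main_e =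
      (List.range args.length).foldl (fun out i =>
        if args[i]?.getD "" ≠ main_e then out
        else
          (pvSubsets ((List.range args.length).filter
              (fun k => k ≠ i ∧ args[k]?.getD "" ≠ "EX_PASS"))).foldl (fun out sel =>
            let parts : List (List Char) := (List.range args.length).map (fun k =>
              if k = i then ['#']
              else if sel.contains k ∨ args[k]?.getD "" = "EX_PASS" then ['_']
              else (args[k]?.getD "").toList)
            let body := ['('] ++ (parts.intersperse [',']).flatten ++ [')']
            let out := out ++ [(String.ofList (pred.toList ++ body), args[i]?.getD "")]
            if sel.length ≠ ((List.range args.length).filter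
                (fun k => k ≠ i ∧ args[k]?.getD "" ≠ "EX_PASS")).length then
              out ++ [(String.ofList ('_' :: body), args[i]?.getD "")]
            else out) out) [] := rfl

-- the inner loops agree for each selected position i
lemma pvLoop_eq (pred : String) (args : List String) (i : Nat) (hi : i < args.length)
    (out0 : List (String × String)) :
    (pvPowerset ((List.range args.length).filter (fun k => k ≠ i))).foldl (fun out j =>
        match pvInnerA args i j (List.range args.length) ['('] with
        | none => out
        | some out_str =>
          let body := out_str.take (out_str.length - 1)
          let out := out ++ [(String.ofList (pred.toList ++ body ++ [')']), args[i]?.getD "")]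
          if j ≠ (List.range args.length).filter (fun k => k ≠ i) then
            out ++ [(String.ofList ('_' :: (body ++ [')'])), args[i]?.getD "")]
          else out) out0
    = (pvSubsets ((List.range args.length).filter
          (fun k => k ≠ i ∧ args[k]?.getD "" ≠ "EX_PASS"))).foldl (fun out sel =>
        let parts : List (List Char) := (List.range args.length).map (fun k =>
          if k = i then ['#']
          else if sel.contains k ∨ args[k]?.getD "" = "EX_PASS" then ['_']
          else (args[k]?.getD "").toList)
        let body := ['('] ++ (parts.intersperse [',']).flatten ++ [')']
        let out := out ++ [(String.ofList (pred.toList ++ body), args[i]?.getD "")]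
        if sel.length ≠ ((List.range args.length).filter
            (fun k => k ≠ i ∧ args[k]?.getD "" ≠ "EX_PASS")).length then
          out ++ [(String.ofList ('_' :: body), args[i]?.getD "")]
        else out) out0 := by
  have hn : args.length ≠ 0 := by omega
  have hund : ((List.range args.length).filter (fun k => k ≠ i)).Nodup :=
    List.nodup_range.filter _
  have hfree : (List.range args.length).filter (fun k => k ≠ i ∧ args[k]?.getD "" ≠ "EX_PASS")
      = ((List.range args.length).filter (fun k => k ≠ i)).filter
          (fun k => !(args[k]?.getD "" == "EX_PASS")) := by
    rw [List.filter_filter]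
    apply List.filter_congr
    intro a _
    by_cases ha1 : a = i <;> by_cases ha2 : args[a]?.getD "" = "EX_PASS" <;> simp [ha1, ha2]
  rw [hfree]
  have hbody : (fun (out : List (String × String)) (j : List Nat) =>
      match pvInnerA args i j (List.range args.length) ['('] with
      | none => out
      | some out_str =>
        let body := out_str.take (out_str.length - 1)
        let out := out ++ [(String.ofList (pred.toList ++ body ++ [')']), args[i]?.getD "")]
        if j ≠ (List.range args.length).filter (fun k => k ≠ i) then
          out ++ [(String.ofList ('_' :: (body ++ [')'])), args[i]?.getD "")]
        else out)
      = (fun out j =>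
        if ((((List.range args.length).filter (fun k => k ≠ i)).filter
              (fun k => args[k]?.getD "" == "EX_PASS")).all (fun e => j.contains e))
        then out ++ pvEmitA pred args i j else out) := by
    funext out j
    by_cases hc : ((((List.range args.length).filter (fun k => k ≠ i)).filter
        (fun k => args[k]?.getD "" == "EX_PASS")).all (fun e => j.contains e)) = true
    · have htake : (['('] ++ (List.range args.length).flatMap (pvPartA args i j)).take
          ((['('] ++ (List.range args.length).flatMap (pvPartA args i j)).length - 1)
          = '(' :: ((List.range args.length).flatMap (pvPartA args i j)).dropLast := by
        rw [← List.dropLast_eq_take, List.dropLast_append_of_ne_nil (pvFlat_ne args i j hn)]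
        rfl
      rw [pvInnerA_eq, pvCond, if_pos hc, if_pos hc]
      simp only [htake, pvEmitA]
      by_cases hje : j = (List.range args.length).filter (fun k => k ≠ i)
      · have hje' : j = List.filter (fun k => !decide (k = i)) (List.range args.length) := by
          simpa using hje
        simp [hje', List.append_assoc]
      · have hje' : ¬ j = List.filter (fun k => !decide (k = i)) (List.range args.length) := by
          simpa using hje
        simp [hje', List.append_assoc]
    · rw [pvInnerA_eq, pvCond, if_neg hc, if_neg hc]
  rw [hbody, pvPowerset_eq_pvSubsets,
      PySem.List.foldl_if_eq_foldl_filter _ (fun out j => out ++ pvEmitA pred args i j) _ _,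
      pvFilter_subsets (fun k => args[k]?.getD "" == "EX_PASS")
        ((List.range args.length).filter (fun k => k ≠ i)) hund,
      List.foldl_map]
  apply PySem.List.foldl_congr_mem'
  intro sel hsel out
  have hsub' : sel.Sublist (((List.range args.length).filter (fun k => k ≠ i)).filter
      (fun k => !(args[k]?.getD "" == "EX_PASS"))) := pvSubsets_sublist hsel
  have hpne : ((List.range args.length).map (fun k =>
      if k = i then ['#']
      else if sel.contains k ∨ args[k]?.getD "" = "EX_PASS" then ['_']
      else (args[k]?.getD "").toList)) ≠ [] := by
    simp [List.map_eq_nil_iff, List.range_eq_nil, hn]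
  have hjoin : (((List.range args.length).flatMap (pvPartA args i
        (((List.range args.length).filter (fun k => k ≠ i)).filter
          (fun k => (args[k]?.getD "" == "EX_PASS") || sel.contains k)))).dropLast)
      = (((List.range args.length).map (fun k =>
          if k = i then ['#']
          else if sel.contains k ∨ args[k]?.getD "" = "EX_PASS" then ['_']
          else (args[k]?.getD "").toList)).intersperse [',']).flatten := by
    rw [← pvJoin_eq _ hpne, List.flatMap_map]
    congr 1
    exact List.flatMap_congr (fun k hk => pvPart_eq args i sel k (List.mem_range.mp hk))
  have htail := pvTail (fun k => args[k]?.getD "" == "EX_PASS")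
      ((List.range args.length).filter (fun k => k ≠ i)) sel hund hsub'
  simp only [pvEmitA, hjoin]
  by_cases hlen : sel.length = (((List.range args.length).filter (fun k => k ≠ i)).filter
      (fun k => !(args[k]?.getD "" == "EX_PASS"))).length
  · have hjeq := htail.mpr hlen
    have h1 : List.filter (fun a => (args[a]?.getD "" == "EX_PASS" || decide (a ∈ sel)) && !decide (a = i))
        (List.range args.length) = List.filter (fun k => !decide (k = i)) (List.range args.length) := by
      simpa using hjeq
    have h2 : sel.length = (List.filter (fun a => (!(args[a]?.getD "" == "EX_PASS")) && !decide (a = i))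
        (List.range args.length)).length := by
      simpa using hlen
    simp [h1, h2, List.append_assoc]
  · have hjne : ¬ (((List.range args.length).filter (fun k => k ≠ i)).filter
        (fun k => (args[k]?.getD "" == "EX_PASS") || sel.contains k)
        = (List.range args.length).filter (fun k => k ≠ i)) := fun h => hlen (htail.mp h)
    have h1 : ¬ (List.filter (fun a => (args[a]?.getD "" == "EX_PASS" || decide (a ∈ sel)) && !decide (a = i))
        (List.range args.length) = List.filter (fun k => !decide (k = i)) (List.range args.length)) := by
      intro h
      exact hjne (by simpa using h)
    have h2 : ¬ sel.length = (List.filter (fun a => (!(args[a]?.getD "" == "EX_PASS")) && !decide (a = i))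
        (List.range args.length)).length := by
      intro h
      exact hlen (by simpa using h)
    simp [h1, h2, List.append_assoc]

-- ===== VERDICT (by name: the statement is the Claim_ definition above) =====
theorem atomic_decomposition_spec : Claim_equal_atomic_decomposition := by
  unfold Claim_equal_atomic_decomposition
  intro item main_e _ hpre
  unfold Spec_atomic_decomposition
  cases item with
  | nil => exact absurd rfl hpre
  | cons pred args =>
    rw [pvA_cons, pvB_cons]
    apply PySem.List.foldl_congr_mem'
    intro i hi out
    by_cases hm : args[i]?.getD "" = main_e
    · rw [if_pos hm, if_neg (not_not_intro hm)]
      exact pvLoop_eq pred args i (List.mem_range.mp hi) out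
    · rw [if_neg hm, if_pos hm]
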